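-- pv_equiv track=rewrite | github.com/0xShay/aoc | day3/part2/main2.py | colSum
-- ===== SOURCE A (Python) =====
-- def colSum(ls, col):
--     cumulSum = 0
--     for line in ls:
--         if line[col] == "1":
--             cumulSum += 1
--         else:
--             cumulSum -= 1
--     return cumulSum
-- ===== SOURCE B (Python) =====
-- def colSum(ls, col):
--     # Divide-and-conquer on index ranges: the column sum of a segment is the
--     # sum of the column sums of its two halves; base case is a single row.
--     def go(lo, hi):
--         if hi - lo == 0:
--             return 0
--         if hi - lo == 1:
--             return 1 if ls[lo][col] == "1" else -1
--         mid = (lo + hi) // 2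
--         return go(lo, mid) + go(mid, hi)
--     return go(0, len(ls))
-- ===== Notes on version B (the rewrite author's own statement) =====
-- stated objective: alternative
-- what changed: Replaces the left-to-right +1/-1 accumulator loop with a divide-and-conquer recursion that splits the row range in halves and adds the two halves' column sums.
import Mathlib
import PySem

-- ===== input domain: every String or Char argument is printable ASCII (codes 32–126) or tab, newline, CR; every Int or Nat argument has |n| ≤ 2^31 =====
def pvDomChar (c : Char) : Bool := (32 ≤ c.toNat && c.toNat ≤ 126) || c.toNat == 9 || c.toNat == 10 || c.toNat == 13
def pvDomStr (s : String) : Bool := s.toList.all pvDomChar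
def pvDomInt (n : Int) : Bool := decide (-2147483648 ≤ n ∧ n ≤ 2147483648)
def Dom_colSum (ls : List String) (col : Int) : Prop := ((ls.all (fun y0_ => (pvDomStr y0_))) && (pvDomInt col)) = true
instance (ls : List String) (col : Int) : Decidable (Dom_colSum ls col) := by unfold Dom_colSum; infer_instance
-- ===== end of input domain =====

-- B replaces A's linear +1/-1 accumulator with a divide-and-conquer recursion
-- over index ranges (alternative decomposition, same O(n) cost).


-- ===== PORT A =====
def colSum (ls : List String) (col : Int) : Int :=
  ls.foldl (fun cumulSum line =>
    if PySem.Str.pyGet? line col = some '1' then cumulSum + 1 else cumulSum - 1) 0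

-- ===== PORT B =====
-- go lo hi: column sum over rows lo..hi-1 by splitting the range in halves.
-- ls[lo] in the single-row base case: lo < ls.length at every reachable call
-- (0 ≤ lo < hi ≤ ls.length), so getD's default is never taken.
def colSumGo (ls : List String) (col : Int) (lo hi : Nat) : Int :=
  if hi - lo = 0 then 0
  else if hi - lo = 1 then
    (if PySem.Str.pyGet? (ls.getD lo "") col = some '1' then 1 else -1)
  else
    colSumGo ls col lo ((lo + hi) / 2) + colSumGo ls col ((lo + hi) / 2) hi
termination_by hi - lo
decreasing_by all_goals omega

def colSum_alt (ls : List String) (col : Int) : Int :=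
  colSumGo ls col 0 ls.length

-- ===== PRECONDITION & SPEC =====
-- Pre_: col must be a valid Python index into every line, else A raises IndexError.
def Pre_colSum (ls : List String) (col : Int) : Prop :=
  ∀ s ∈ ls, PySem.Raise.InRange s.toList.length col
instance (ls : List String) (col : Int) : Decidable (Pre_colSum ls col) := by
  unfold Pre_colSum; infer_instance
def pvWitness_colSum : List String × Int := (["101", "010"], 1)

def Spec_colSum (ls : List String) (col : Int) (out : Int) : Prop := out = colSum_alt ls col
instance (ls : List String) (col : Int) (out : Int) : Decidable (Spec_colSum ls col out) := by unfold Spec_colSum; infer_instance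

-- ===== CLAIM (what is proved, stated in full; the proofs are below) =====
def Claim_equal_colSum : Prop := ∀ (ls : List String) (col : Int), Dom_colSum ls col → Pre_colSum ls col → Spec_colSum ls col (colSum ls col)

-- ===== LEMMAS AND PROOFS =====
def cellVal (col : Int) (s : String) : Int :=
  if PySem.Str.pyGet? s col = some '1' then 1 else -1

theorem colSum_foldl_eq (col : Int) (ls : List String) (a : Int) :
    ls.foldl (fun cumulSum line =>
      if PySem.Str.pyGet? line col = some '1' then cumulSum + 1 else cumulSum - 1) a
    = a + (ls.map (cellVal col)).sum := by
  induction ls generalizing a with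
  | nil => simp
  | cons x xs ih =>
    simp only [List.foldl_cons, List.map_cons, List.sum_cons, ih, cellVal]
    split_ifs <;> ring

theorem colSumGo_eq (ls : List String) (col : Int) :
    ∀ n lo hi, hi - lo = n → hi ≤ ls.length →
      colSumGo ls col lo hi = (((ls.drop lo).take (hi - lo)).map (cellVal col)).sum := by
  intro n
  induction n using Nat.strong_induction_on with
  | _ n ih =>
    intro lo hi hn hle
    unfold colSumGo
    by_cases h0 : hi - lo = 0
    · simp [h0]
    · by_cases h1 : hi - lo = 1
      · have hlt : lo < ls.length := by omega
        rw [if_neg h0, if_pos h1, h1]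
        have hd : ls.drop lo = ls[lo] :: ls.drop (lo + 1) := List.drop_eq_getElem_cons hlt
        rw [hd]
        simp only [List.take_succ_cons, List.take_zero, List.map_cons, List.map_nil,
          List.sum_cons, List.sum_nil, add_zero,
          List.getD_eq_getElem?_getD, List.getElem?_eq_getElem hlt, Option.getD_some]
        rfl
      · have h2 : 2 ≤ hi - lo := by omega
        set mid := (lo + hi) / 2 with hmid
        have hlo : lo < mid := by omega
        have hhi : mid < hi := by omega
        rw [if_neg h0, if_neg h1,
            ih (mid - lo) (by omega) lo mid rfl (by omega),
            ih (hi - mid) (by omega) mid hi rfl hle]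
        have hdrop : ls.drop mid = (ls.drop lo).drop (mid - lo) := by
          rw [List.drop_drop]; congr 1; omega
        rw [hdrop, ← List.sum_append, ← List.map_append, ← List.take_add]
        have hsum : mid - lo + (hi - mid) = hi - lo := by omega
        rw [hsum]

-- ===== VERDICT (by name: the statement is the Claim_ definition above) =====
theorem colSum_spec : Claim_equal_colSum := by
  intro ls col _ _
  unfold Spec_colSum colSum colSum_alt
  rw [colSum_foldl_eq, colSumGo_eq ls col ls.length 0 ls.length rfl le_rfl]
  simp
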